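/- GENERATED by c/gen_decode.py: every decode fact of the image. -/
import ProgX.Base.Dec.All
import Gif.Dec.D000
import Gif.Dec.D001
import Gif.Dec.D002
import Gif.Dec.D003
import Gif.Dec.D004
import Gif.Dec.D005
import Gif.Dec.D006
import Gif.Dec.D007
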